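-- pv_equiv track=rewrite | github.com/hwayeon351/BEAKJOON-Algorithms | BJ2512.py | getLimit
-- ===== SOURCE A (Python) =====
-- def getLimit(left, right, areas, N, M):
--     answer = min(left, right)
--     while left <= right:
--         mid = (left+right)//2
--         total = 0
--         for area in areas:
--             total += min(area, mid)
--         if total > M:
--             right = mid-1
--         else:
--             answer = mid
--             left = mid + 1
--     return answer
-- ===== SOURCE B (Python) =====
-- def getLimit(left, right, areas, N, M):
--     # Sort once and keep prefix sums so each capped sum is O(log N) via
--     # hand-rolled bisect, instead of an O(N) scan per binary-search step.
--     srt = sorted(areas)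
--     pref = [0]
--     acc = 0
--     for a in srt:
--         acc += a
--         pref.append(acc)
--     n = len(srt)
--
--     def capped(mid):
--         lo, hi = 0, n
--         while lo < hi:
--             m = (lo + hi) // 2
--             if srt[m] <= mid:
--                 lo = m + 1
--             else:
--                 hi = m
--         return pref[lo] + (n - lo) * mid
--
--     answer = min(left, right)
--     lo, hi = left, right
--     while lo <= hi:
--         mid = (lo + hi) // 2
--         if capped(mid) > M:
--             hi = mid - 1
--         else:
--             answer = mid
--             lo = mid + 1
--     return answer
-- ===== Notes on version B (the rewrite author's own statement) =====
-- stated objective: faster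
-- what changed: The O(N) inner scan summing min(area,mid) on every binary-search step is replaced by sorting the areas once with prefix sums, so each capped sum is evaluated in O(log N) by a hand-written bisect.
import Mathlib
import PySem

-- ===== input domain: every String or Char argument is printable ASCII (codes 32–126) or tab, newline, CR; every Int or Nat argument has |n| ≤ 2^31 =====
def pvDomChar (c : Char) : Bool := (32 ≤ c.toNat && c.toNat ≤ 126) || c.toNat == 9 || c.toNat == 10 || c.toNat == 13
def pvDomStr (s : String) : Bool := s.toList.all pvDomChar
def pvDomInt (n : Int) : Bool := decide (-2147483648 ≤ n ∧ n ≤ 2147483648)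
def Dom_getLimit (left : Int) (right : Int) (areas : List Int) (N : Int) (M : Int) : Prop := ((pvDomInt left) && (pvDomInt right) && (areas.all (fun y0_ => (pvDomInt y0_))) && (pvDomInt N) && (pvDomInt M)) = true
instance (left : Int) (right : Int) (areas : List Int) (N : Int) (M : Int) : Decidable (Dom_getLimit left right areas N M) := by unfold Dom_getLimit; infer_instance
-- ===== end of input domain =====

-- B replaces A's O(N) per-step scan by sort + prefix sums + bisect (measured faster); return values proved equal on all inputs.


-- ===== PORT A =====
-- the while-loop of A, state (left, right, answer); the fuel argument only
-- makes the loop total: (right + 1 - left).toNat iterations always suffice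
-- since each step strictly shrinks the interval
def getLimitGo (areas : List Int) (M : Int) : Nat → Int → Int → Int → Int
  | 0, _, _, answer => answer
  | Nat.succ fuel, left, right, answer =>
    if left ≤ right then
      let mid := PySem.Int.floordiv (left + right) 2
      let total := areas.foldl (fun t a => t + min a mid) 0
      if total > M then getLimitGo areas M fuel left (mid - 1) answer
      else getLimitGo areas M fuel (mid + 1) right mid
    else answer

def getLimit (left : Int) (right : Int) (areas : List Int) (N : Int) (M : Int) : Int :=
  getLimitGo areas M (right + 1 - left).toNat left right (min left right)

-- ===== PORT B =====
-- the inner while-loop of capped(): hand-written bisect; srt[m] is always in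
-- range so the pyGetD default is never returned; the fuel argument only makes
-- the loop total ((hi - lo).toNat iterations always suffice)
def bisectGo (srt : List Int) (mid : Int) : Nat → Int → Int → Int
  | 0, lo, _ => lo
  | Nat.succ fuel, lo, hi =>
    if lo < hi then
      let m := PySem.Int.floordiv (lo + hi) 2
      if PySem.List.pyGetD srt m 0 ≤ mid then bisectGo srt mid fuel (m + 1) hi
      else bisectGo srt mid fuel lo m
    else lo

-- capped(mid): pref[lo] is always in range, so the pyGetD default is never returned
def cappedB (srt pref : List Int) (n mid : Int) : Int :=
  let lo := bisectGo srt mid n.toNat 0 n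
  PySem.List.pyGetD pref lo 0 + (n - lo) * mid

-- the outer while-loop of B, state (lo, hi, answer); fuel as in getLimitGo
def getLimitAltGo (srt pref : List Int) (n M : Int) : Nat → Int → Int → Int → Int
  | 0, _, _, answer => answer
  | Nat.succ fuel, lo, hi, answer =>
    if lo ≤ hi then
      let mid := PySem.Int.floordiv (lo + hi) 2
      if cappedB srt pref n mid > M then getLimitAltGo srt pref n M fuel lo (mid - 1) answer
      else getLimitAltGo srt pref n M fuel (mid + 1) hi mid
    else answer

def getLimit_alt (left : Int) (right : Int) (areas : List Int) (N : Int) (M : Int) : Int :=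
  let srt := PySem.List.sorted areas (fun x => x) false
  -- the pref-building for-loop, state (acc, pref)
  let st := srt.foldl (fun (st : Int × List Int) a => (st.1 + a, st.2 ++ [st.1 + a])) (0, [0])
  let pref := st.2
  let n : Int := srt.length
  getLimitAltGo srt pref n M (right + 1 - left).toNat left right (min left right)

-- ===== PRECONDITION & SPEC =====
def Spec_getLimit (left : Int) (right : Int) (areas : List Int) (N : Int) (M : Int) (out : Int) : Prop := out = getLimit_alt left right areas N M
instance (left : Int) (right : Int) (areas : List Int) (N : Int) (M : Int) (out : Int) : Decidable (Spec_getLimit left right areas N M out) := by unfold Spec_getLimit; infer_instance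

-- ===== CLAIM (what is proved, stated in full; the proofs are below) =====
def Claim_equal_getLimit : Prop := ∀ (left : Int) (right : Int) (areas : List Int) (N : Int) (M : Int), Dom_getLimit left right areas N M → Spec_getLimit left right areas N M (getLimit left right areas N M)

-- ===== LEMMAS AND PROOFS =====

-- A's inner fold is the sum of the capped elements
lemma foldl_min_eq_sum (l : List Int) (mid : Int) :
    ∀ c : Int, l.foldl (fun t a => t + min a mid) c = c + (l.map (fun a => min a mid)).sum := by
  induction l with
  | nil => simp
  | cons a t ih => intro c; simp [ih]; ring

-- sorted lists are pointwise monotone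
lemma sorted_getD_mono (s : List Int) (hs : s.Pairwise (· ≤ ·)) (i j : Nat)
    (hij : i ≤ j) (hj : j < s.length) : s.getD i 0 ≤ s.getD j 0 := by
  rcases Nat.eq_or_lt_of_le hij with h | h
  · subst h; exact le_refl _
  · rw [List.getD_eq_getElem s 0 (lt_of_le_of_lt hij hj), List.getD_eq_getElem s 0 hj]
    exact List.pairwise_iff_getElem.1 hs i j _ hj h

-- bisectGo computes the partition point of mid in the sorted list
lemma bisectGo_correct (s : List Int) (mid : Int) (hs : s.Pairwise (· ≤ ·)) :
    ∀ d : Nat, ∀ lo hi : Int, (hi - lo).toNat ≤ d → 0 ≤ lo → lo ≤ hi → hi ≤ (s.length : Int) →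
    (∀ i : Nat, (i : Int) < lo → s.getD i 0 ≤ mid) →
    (∀ i : Nat, hi ≤ (i : Int) → i < s.length → mid < s.getD i 0) →
    ∃ k : Nat, bisectGo s mid d lo hi = (k : Int) ∧ k ≤ s.length ∧
      (∀ i : Nat, i < k → s.getD i 0 ≤ mid) ∧
      (∀ i : Nat, k ≤ i → i < s.length → mid < s.getD i 0) := by
  intro d
  induction d with
  | zero =>
    intro lo hi hd h0 hlh hhl hinvL hinvR
    have hle : lo = hi := by omega
    refine ⟨lo.toNat, ?_, by omega, fun i hi2 => hinvL i (by omega),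
      fun i hi2 hi3 => hinvR i (by omega) hi3⟩
    rw [bisectGo]; omega
  | succ d ih =>
    intro lo hi hd h0 hlh hhl hinvL hinvR
    by_cases h : lo < hi
    · rw [bisectGo]
      simp only [h, if_pos]
      have hb := PySem.Int.floordiv_two_mid_bounds (le_of_lt h)
      have h2 : PySem.Int.floordiv (lo + hi) 2 < hi :=
        (PySem.Int.floordiv_lt_iff_lt_mul (by omega)).2 (by omega)
      set m := PySem.Int.floordiv (lo + hi) 2 with hm
      have hmlen : m < (s.length : Int) := by omega
      have hget : PySem.List.pyGetD s m 0 = s.getD m.toNat 0 := by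
        rw [PySem.List.pyGetD_eq_getElem s 0 (by omega) hmlen,
            List.getD_eq_getElem s 0 (by omega)]
      by_cases hc : PySem.List.pyGetD s m 0 ≤ mid
      · simp only [hc, if_pos]
        refine ih (m + 1) hi (by omega) (by omega) (by omega) hhl ?_ hinvR
        intro i hi2
        have : s.getD m.toNat 0 ≤ mid := by rw [← hget]; exact hc
        exact le_trans (sorted_getD_mono s hs i m.toNat (by omega) (by omega)) this
      · simp only [hc, if_neg, not_false_iff]
        refine ih lo m (by omega) h0 (by omega) (by omega) hinvL ?_
        intro i hi2 hi3
        have : mid < s.getD m.toNat 0 := by rw [← hget]; omega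
        exact lt_of_lt_of_le this (sorted_getD_mono s hs m.toNat i (by omega) hi3)
    · have hle : lo = hi := by omega
      refine ⟨lo.toNat, ?_, by omega, fun i hi2 => hinvL i (by omega),
        fun i hi2 hi3 => hinvR i (by omega) hi3⟩
      rw [bisectGo]
      simp only [h, if_neg, not_false_iff]
      omega

-- the prefix-sum fold produces all partial sums
lemma pref_fold (l : List Int) :
    ∀ (acc : Int) (p : List Int),
    (l.foldl (fun (st : Int × List Int) a => (st.1 + a, st.2 ++ [st.1 + a])) (acc, p)).2
      = p ++ (List.range l.length).map (fun j => acc + (l.take (j + 1)).sum) := by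
  induction l with
  | nil => simp
  | cons a t ih =>
    intro acc p
    simp only [List.foldl_cons, ih (acc + a) (p ++ [acc + a]), List.length_cons,
      List.range_succ_eq_map, List.map_cons, List.map_map]
    simp [List.append_assoc, add_assoc]

-- the built pref list, read at k ≤ length, is the sum of the first k sorted areas
lemma pref_getD (s : List Int) (k : Nat) (hk : k ≤ s.length) :
    ((s.foldl (fun (st : Int × List Int) a => (st.1 + a, st.2 ++ [st.1 + a])) (0, [0])).2).getD k 0
      = (s.take k).sum := by
  rw [pref_fold]
  cases k with
  | zero => simp
  | succ j =>
    have hj : j < s.length := by omega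
    simp [List.getD, List.getElem?_map, List.getElem?_range hj]

-- splitting the capped sum at the partition point
lemma capped_sum_split (s : List Int) (mid : Int) (k : Nat) (hk : k ≤ s.length)
    (hL : ∀ i : Nat, i < k → s.getD i 0 ≤ mid)
    (hR : ∀ i : Nat, k ≤ i → i < s.length → mid < s.getD i 0) :
    (s.map (fun a => min a mid)).sum
      = (s.take k).sum + ((s.length : Int) - k) * mid := by
  conv_lhs => rw [← List.take_append_drop k s]
  rw [List.map_append, List.sum_append]
  have htake : (s.take k).map (fun a => min a mid) = s.take k := by
    conv_rhs => rw [← List.map_id (s.take k)]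
    apply List.map_congr_left
    intro a ha
    rcases List.mem_iff_getElem.1 ha with ⟨i, hilen, hai⟩
    have hik : i < k := lt_of_lt_of_le hilen (by simp [List.length_take])
    have hlen' : i < s.length := by omega
    have hsa : s.getD i 0 = a := by
      rw [List.getD_eq_getElem s 0 hlen', ← hai]
      simp [List.getElem_take]
    have : a ≤ mid := hsa ▸ hL i hik
    simp [min_eq_left this]

  have hdrop : (s.drop k).map (fun a => min a mid) = List.replicate (s.length - k) mid := by
    rw [List.eq_replicate_iff]
    constructor
    · simp
    · intro b hb
      rcases List.mem_map.1 hb with ⟨a, ha, hab⟩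
      rcases List.mem_iff_getElem.1 ha with ⟨i, hilen, hai⟩
      have hlen' : k + i < s.length := by simp [List.length_drop] at hilen; omega
      have hsa : s.getD (k + i) 0 = a := by
        rw [List.getD_eq_getElem s 0 hlen', ← hai]
        simp [List.getElem_drop]
      have hmid : mid < a := hsa ▸ hR (k + i) (by omega) hlen'
      rw [← hab, min_eq_right (le_of_lt hmid)]
  rw [htake, hdrop, List.sum_replicate, nsmul_eq_mul]
  push_cast [hk]
  ring

-- the fast capped sum equals A's inner fold
lemma cappedB_eq (areas : List Int) (mid : Int) :
    cappedB (PySem.List.sorted areas (fun x => x) false)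
      ((PySem.List.sorted areas (fun x => x) false).foldl
        (fun (st : Int × List Int) a => (st.1 + a, st.2 ++ [st.1 + a])) (0, [0])).2
      ((PySem.List.sorted areas (fun x => x) false).length) mid
      = areas.foldl (fun t a => t + min a mid) 0 := by
  set s := PySem.List.sorted areas (fun x => x) false with hsdef
  have hperm : s.Perm areas := PySem.List.sorted_perm areas (fun x => x) false
  have hpair : s.Pairwise (· ≤ ·) := PySem.List.sorted_pairwise areas (fun x => x)
  obtain ⟨k, hkeq, hklen, hL, hR⟩ :=
    bisectGo_correct s mid hpair ((s.length : Int)).toNat 0 (s.length)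
      (by omega) (by omega) (by omega) (le_refl _)
      (by intro i h; omega) (by intro i h1 h2; omega)
  rw [cappedB]
  simp only [hkeq, PySem.List.pyGetD_natCast]
  rw [pref_getD s k hklen, foldl_min_eq_sum, zero_add,
      ← (hperm.map (fun a => min a mid)).sum_eq, capped_sum_split s mid k hklen hL hR]

-- both binary-search loops agree step by step
lemma go_eq (areas srt pref : List Int) (n M : Int)
    (hcap : ∀ mid, cappedB srt pref n mid = areas.foldl (fun t a => t + min a mid) 0) :
    ∀ fuel : Nat, ∀ l r ans : Int,
    getLimitGo areas M fuel l r ans = getLimitAltGo srt pref n M fuel l r ans := by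
  intro fuel
  induction fuel with
  | zero => intro l r ans; rfl
  | succ d ih =>
    intro l r ans
    rw [getLimitGo, getLimitAltGo]
    by_cases h : l ≤ r
    · simp only [h, if_pos, hcap]
      split_ifs <;> apply ih
    · simp only [h, if_neg, not_false_iff]

-- ===== VERDICT (by name: the statement is the Claim_ definition above) =====
theorem getLimit_spec : Claim_equal_getLimit := by
  intro left right areas N M _
  unfold Spec_getLimit getLimit getLimit_alt
  exact go_eq areas _ _ _ M (fun mid => cappedB_eq areas mid)
    (right + 1 - left).toNat left right (min left right)
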